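-- pv_equiv track=rewrite | github.com/SebastianMartinNS/SYGMA-NEX | sigma_nex/core/context.py | optimize_history
-- ===== SOURCE A (Python) =====
-- def optimize_history(history: list, max_length: int = 4000, max_entries: int = 10) -> list:
--     """
--     Optimize conversation history by reducing length and keeping most relevant parts.
--
--     Args:
--         history: List of conversation history
--         max_length: Maximum total character length
--         max_entries: Maximum number of history entries
--
--     Returns:
--         Optimized history list
--     """
--     if not history:
--         return []
--
--     # First, limit by number of entries (keep most recent)
--     if len(history) > max_entries:
--         history = history[-max_entries:]
--
--     # Then, limit by total length
--     total_length = sum(len(str(entry)) for entry in history)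
--
--     if total_length <= max_length:
--         return history
--
--     # Remove entries from the beginning until we're under limit
--     optimized = history[:]
--     while optimized and sum(len(str(entry)) for entry in optimized) > max_length:
--         optimized.pop(0)
--
--     # Ensure we keep at least the last entry
--     if not optimized and history:
--         optimized = [history[-1]]
--
--     return optimized
-- ===== SOURCE B (Python) =====
-- def optimize_history(history: list, max_length: int = 4000, max_entries: int = 10) -> list:
--     if not history:
--         return []
--     if len(history) > max_entries:
--         history = history[-max_entries:]
--     # One pass from the back: keep the longest suffix whose total length fits.
--     kept = []
--     total = 0
--     for entry in reversed(history):
--         n = len(str(entry))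
--         if total + n > max_length:
--             break
--         kept.append(entry)
--         total += n
--     kept.reverse()
--     return kept if kept else history[-1:]
-- ===== Notes on version B (the rewrite author's own statement) =====
-- stated objective: alternative
-- what changed: Replaces A's pop-from-front loop that recomputes the total length of the remaining list on every iteration with a single backward pass keeping a running total (longest suffix that fits); avoids A's quadratic re-summing, though a timing run could not confirm a speed-up at the largest size.
import Mathlib
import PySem

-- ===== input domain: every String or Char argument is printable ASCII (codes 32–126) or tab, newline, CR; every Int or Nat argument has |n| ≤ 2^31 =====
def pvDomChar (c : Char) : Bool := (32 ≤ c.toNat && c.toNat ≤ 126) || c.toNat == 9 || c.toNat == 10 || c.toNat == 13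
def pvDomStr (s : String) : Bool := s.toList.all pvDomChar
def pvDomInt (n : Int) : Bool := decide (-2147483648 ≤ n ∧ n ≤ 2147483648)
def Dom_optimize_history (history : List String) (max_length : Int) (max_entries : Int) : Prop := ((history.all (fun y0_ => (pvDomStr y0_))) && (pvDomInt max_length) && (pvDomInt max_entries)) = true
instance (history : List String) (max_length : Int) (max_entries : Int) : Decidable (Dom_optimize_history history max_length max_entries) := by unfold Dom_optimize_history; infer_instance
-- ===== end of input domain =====

-- B replaces A's quadratic pop-from-front loop (re-summing the list each iteration)
-- with a single backward pass keeping a running total (one pass, same result).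


-- ===== PORT A =====
-- sum(len(str(entry)) for entry in l)  (entries are strings, so str() is the identity)
def pvSumLens (l : List String) : Int := (l.map PySem.Str.len).sum

-- while optimized and sum(len(str(e)) for e in optimized) > max_length: optimized.pop(0)
def pvALoop (maxL : Int) : List String → List String
  | [] => []
  | x :: rest => if pvSumLens (x :: rest) > maxL then pvALoop maxL rest else x :: rest

def optimize_history (history : List String) (max_length : Int) (max_entries : Int) : List String :=
  if history = [] then []
  else
    let history := if (history.length : Int) > max_entries then PySem.List.slice history (some (-max_entries)) none else history
    let total_length := pvSumLens history
    if total_length ≤ max_length then history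
    else
      let optimized := pvALoop max_length history
      if optimized = [] ∧ history ≠ [] then
        match PySem.List.pyGet? history (-1) with
        | some x => [x]
        | none => []
      else optimized

-- ===== PORT B =====
-- for entry in reversed(history): n = len(str(entry)); if total+n > max_length: break; kept.append(entry); total += n
-- (kept is built over the reversed list, then reversed back)
def pvBTake (maxL : Int) : List String → Int → List String
  | [], _ => []
  | x :: rest, total =>
    let n := PySem.Str.len x
    if total + n > maxL then [] else x :: pvBTake maxL rest (total + n)

def optimize_history_alt (history : List String) (max_length : Int) (max_entries : Int) : List String :=
  if history = [] then []
  else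
    let history := if (history.length : Int) > max_entries then PySem.List.slice history (some (-max_entries)) none else history
    let kept := (pvBTake max_length history.reverse 0).reverse
    if kept = [] then PySem.List.slice history (some (-1)) none else kept

-- ===== PRECONDITION & SPEC =====
def Spec_optimize_history (history : List String) (max_length : Int) (max_entries : Int) (out : List String) : Prop := out = optimize_history_alt history max_length max_entries
instance (history : List String) (max_length : Int) (max_entries : Int) (out : List String) : Decidable (Spec_optimize_history history max_length max_entries out) := by unfold Spec_optimize_history; infer_instance

-- ===== CLAIM (what is proved, stated in full; the proofs are below) =====
def Claim_equal_optimize_history : Prop := ∀ (history : List String) (max_length : Int) (max_entries : Int), Dom_optimize_history history max_length max_entries → Spec_optimize_history history max_length max_entries (optimize_history history max_length max_entries)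

-- ===== LEMMAS AND PROOFS =====

theorem pvSumLens_nil : pvSumLens [] = 0 := rfl

theorem pvSumLens_cons (x : String) (l : List String) :
    pvSumLens (x :: l) = PySem.Str.len x + pvSumLens l := by
  simp [pvSumLens]

theorem pvSumLens_nonneg (l : List String) : 0 ≤ pvSumLens l := by
  induction l with
  | nil => simp [pvSumLens]
  | cons x rest ih =>
      rw [pvSumLens_cons]
      have : 0 ≤ PySem.Str.len x := by simp [PySem.Str.len_eq]
      omega

theorem pvSumLens_reverse (l : List String) : pvSumLens l.reverse = pvSumLens l := by
  simp [pvSumLens]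

theorem pvLen_nonneg (s : String) : 0 ≤ PySem.Str.len s := by
  simp [PySem.Str.len_eq]

-- B's greedy pass takes the whole list when the whole list fits
theorem pvBTake_full (maxL : Int) (r : List String) (t : Int)
    (h : t + pvSumLens r ≤ maxL) : pvBTake maxL r t = r := by
  induction r generalizing t with
  | nil => rfl
  | cons x rest ih =>
      rw [pvSumLens_cons] at h
      have hx : 0 ≤ PySem.Str.len x := pvLen_nonneg x
      have hr : 0 ≤ pvSumLens rest := pvSumLens_nonneg rest
      simp only [pvBTake]
      rw [if_neg (by omega)]
      rw [ih (t + PySem.Str.len x) (by omega)]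

-- the last element is never taken when the whole list does not fit
theorem pvBTake_stop (maxL : Int) (x : String) (r : List String) (t : Int)
    (h : maxL < t + pvSumLens r + PySem.Str.len x) :
    pvBTake maxL (r ++ [x]) t = pvBTake maxL r t := by
  induction r generalizing t with
  | nil =>
      rw [pvSumLens_nil] at h
      simp only [List.nil_append, pvBTake]
      rw [if_pos (by omega)]
  | cons y rest ih =>
      rw [pvSumLens_cons] at h
      simp only [List.cons_append, pvBTake]
      by_cases hy : t + PySem.Str.len y > maxL
      · rw [if_pos hy, if_pos hy]
      · rw [if_neg hy, if_neg hy, ih (t + PySem.Str.len y) (by omega)]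

-- B's backward pass computes exactly A's pop-from-front loop
theorem pvBridge (maxL : Int) (h : List String) :
    (pvBTake maxL h.reverse 0).reverse = pvALoop maxL h := by
  induction h with
  | nil => rfl
  | cons x rest ih =>
      simp only [pvALoop, List.reverse_cons]
      by_cases hs : pvSumLens (x :: rest) > maxL
      · rw [if_pos hs]
        rw [pvBTake_stop maxL x rest.reverse 0
          (by rw [pvSumLens_reverse]; rw [pvSumLens_cons] at hs; omega)]
        exact ih
      · rw [if_neg hs]
        rw [show rest.reverse ++ [x] = (x :: rest).reverse by simp]
        rw [pvBTake_full maxL (x :: rest).reverse 0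
          (by rw [pvSumLens_reverse]; omega)]
        simp

theorem pvDropLast_singleton (h : List String) (hne : h ≠ []) :
    h.drop (h.length - 1) = [h.getLast hne] := by
  induction h with
  | nil => exact absurd rfl hne
  | cons x rest ih =>
      cases rest with
      | nil => rfl
      | cons y r =>
          have : (x :: y :: r).drop ((x :: y :: r).length - 1) = (y :: r).drop ((y :: r).length - 1) := by
            simp
          rw [this, ih (by simp)]
          simp [List.getLast]

-- the two ports agree after the shared empty-check and slice, for any list h
theorem pvCore (maxL : Int) (h : List String) :
    (if pvSumLens h ≤ maxL then h
     else
       let optimized := pvALoop maxL h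
       if optimized = [] ∧ h ≠ [] then
         match PySem.List.pyGet? h (-1) with
         | some x => [x]
         | none => []
       else optimized) =
    (let kept := (pvBTake maxL h.reverse 0).reverse
     if kept = [] then PySem.List.slice h (some (-1)) none else kept) := by
  simp only [pvBridge]
  by_cases hfit : pvSumLens h ≤ maxL
  · rw [if_pos hfit]
    cases h with
    | nil =>
        simp [pvALoop, PySem.List.slice_from_neg_one]
    | cons x rest =>
        have : pvALoop maxL (x :: rest) = x :: rest := by
          simp only [pvALoop]; rw [if_neg (by omega)]
        rw [this]
        simp
  · rw [if_neg hfit]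
    by_cases hne : h = []
    · subst hne
      simp [pvALoop, PySem.List.slice_from_neg_one]
    · by_cases hopt : pvALoop maxL h = []
      · rw [hopt]
        simp only [hne, and_true, ne_eq, not_false_eq_true, if_pos]
        rw [PySem.List.pyGet?_neg_one, PySem.List.slice_from_neg_one,
          List.getLast?_eq_some_getLast hne, pvDropLast_singleton h hne]
      · rw [if_neg (by simp [hopt]), if_neg hopt]

-- ===== VERDICT (by name: the statement is the Claim_ definition above) =====
theorem optimize_history_spec : Claim_equal_optimize_history := by
  intro history max_length max_entries _
  unfold Spec_optimize_history optimize_history optimize_history_alt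
  by_cases hnil : history = []
  · rw [if_pos hnil, if_pos hnil]
  · rw [if_neg hnil, if_neg hnil]
    exact pvCore max_length _
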